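-- pv_equiv track=rewrite | github.com/Juhyung990122/Study_Algorithm | exercise/sc1.py | solution
-- ===== SOURCE A (Python) =====
-- def solution(skill, skill_trees):
--     answer = 0
--     skill_order = list(skill)
--     for s in skill_trees:
--         available = True
--         s = list(s)
--         visited = [0] * len(skill_order)
--         for i in s:
--             if i == skill_order[0]:
--                 visited[0] = 1
--                 continue
--             if i in skill_order:
--                 if visited[skill_order.index(i)-1] == 1:
--                     visited[skill_order.index(i)] = 1
--                     available = True
--                 else:
--                     available = False
--                     break
--         if available:
--             answer += 1
--     return answer
-- ===== SOURCE B (Python) =====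
-- def solution(skill, skill_trees):
--     first = {}
--     for i, c in enumerate(skill):
--         if c not in first:
--             first[c] = i
--     answer = 0
--     for tree in skill_trees:
--         order = []
--         for c in tree:
--             if c in first and c not in order:
--                 order.append(c)
--         if [first[c] for c in order] == list(range(len(order))):
--             answer += 1
--     return answer
-- ===== Notes on version B (the rewrite author's own statement) =====
-- stated objective: faster
-- what changed: A tracks a visited array per tree with repeated skill_order.index()/membership scans and a break flag; B precomputes a first-occurrence-index dict of skill once, then per tree records the first-occurrence order of present skill chars and accepts iff their indices are exactly 0..m-1 (the skill prefix in order), removing the inner scans over skill.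
import Mathlib
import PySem

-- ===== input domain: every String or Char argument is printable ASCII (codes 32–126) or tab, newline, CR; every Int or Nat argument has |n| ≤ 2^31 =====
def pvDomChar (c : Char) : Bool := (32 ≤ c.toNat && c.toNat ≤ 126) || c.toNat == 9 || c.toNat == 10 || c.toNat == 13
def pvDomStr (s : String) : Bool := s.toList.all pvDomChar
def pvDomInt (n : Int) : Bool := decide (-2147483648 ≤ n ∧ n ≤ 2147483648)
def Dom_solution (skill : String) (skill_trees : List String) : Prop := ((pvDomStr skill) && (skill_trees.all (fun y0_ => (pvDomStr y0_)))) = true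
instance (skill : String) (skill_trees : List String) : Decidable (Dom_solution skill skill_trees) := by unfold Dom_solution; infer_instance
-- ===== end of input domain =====

-- B replaces A's visited-array/.index() scanning with a first-occurrence-index map over skill
-- plus a per-tree first-occurrence order that is checked against the skill prefix, removing the inner scans over skill (objective: faster, measured).
-- A raises IndexError when skill is empty and some tree is nonempty; those inputs are outside Pre_.

-- ===== PORT A =====
-- inner 'for i in s' loop of A; 'break' = returning false (available=False), fall-through = true
def solLoop (so : List Char) : List Char → List Int → Bool
  | [], _ => true
  | i :: rest, visited =>
    match PySem.List.pyGet? so 0 with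
    | none => false   -- Python raises IndexError here (skill empty, tree nonempty); outside Pre_
    | some h =>
      if i = h then solLoop so rest (visited.set 0 1)
      else if i ∈ so then
        match PySem.List.index? so i with
        | none => false  -- unreachable: i ∈ so
        | some idx =>
          if PySem.List.pyGet? visited ((idx : Int) - 1) = some 1 then
            solLoop so rest (visited.set idx 1)
          else false
      else solLoop so rest visited

def solution (skill : String) (skill_trees : List String) : Int :=
  let skill_order := skill.toList
  skill_trees.foldl (fun answer s =>
    if solLoop skill_order s.toList (List.replicate skill_order.length 0) then answer + 1
    else answer) 0

-- ===== PORT B =====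
-- first-occurrence index of each skill char (Python: 'if c not in first: first[c] = i')
def buildFirst (skill : List Char) : PySem.Dict Char Int :=
  (PySem.List.enumerate skill 0).foldl
    (fun first p => if first.contains p.2 then first else first.insert p.2 p.1)
    PySem.Dict.empty

-- per-tree first-occurrence order of skill chars (Python: order list with 'c not in order')
def altOrder (first : PySem.Dict Char Int) (tree : List Char) : List Char :=
  tree.foldl (fun order c => if first.contains c && !(order.contains c) then order ++ [c] else order) []

def solution_alt (skill : String) (skill_trees : List String) : Int :=
  let first := buildFirst skill.toList
  skill_trees.foldl (fun answer tree =>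
    let order := altOrder first tree.toList
    if order.map (fun c => first.getD c 0) = PySem.List.pyRange 0 (order.length : Int) 1 then
      answer + 1
    else answer) 0

-- ===== PRECONDITION & SPEC =====
-- Pre_ excludes exactly the inputs where A raises IndexError: empty skill with some nonempty tree.
def Pre_solution (skill : String) (skill_trees : List String) : Prop :=
  skill.toList ≠ [] ∨ ∀ t ∈ skill_trees, t.toList = []
instance (skill : String) (skill_trees : List String) : Decidable (Pre_solution skill skill_trees) := by
  unfold Pre_solution; infer_instance

def pvWitness_solution : String × List String := ("CBD", ["BACDE", "CBADF", "AECB", "BDA"])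

def Spec_solution (skill : String) (skill_trees : List String) (out : Int) : Prop := out = solution_alt skill skill_trees
instance (skill : String) (skill_trees : List String) (out : Int) : Decidable (Spec_solution skill skill_trees out) := by unfold Spec_solution; infer_instance

-- ===== CLAIM (what is proved, stated in full; the proofs are below) =====
def Claim_equal_solution : Prop := ∀ (skill : String) (skill_trees : List String), Dom_solution skill skill_trees → Pre_solution skill skill_trees → Spec_solution skill skill_trees (solution skill skill_trees)

-- ===== LEMMAS AND PROOFS =====

-- clean ℕ-level view of one tree: the sequence of first-occurrence skill indices of its chars
def idxSeq (so : List Char) (chars : List Char) : List ℕ :=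
  chars.filterMap (fun c => if c ∈ so then some (so.idxOf c) else none)

-- frontier-counter predicate: the common semantics of both per-tree checks
def cnt : List ℕ → ℕ → Bool
  | [], _ => true
  | d :: r, k => if k < d then false else cnt r (if d = k then k + 1 else k)

-- dedup keeping first occurrences, relative to an already-seen list
def ddfS (seen : List ℕ) : List ℕ → List ℕ
  | [] => []
  | d :: r => if d ∈ seen then ddfS seen r else d :: ddfS (d :: seen) r

-- A's visited array when the visited set is {0, …, k-1}
def vis (n k : ℕ) : List Int := (List.range n).map (fun j => if j < k then 1 else 0)

-- B's order accumulator, with the dict/list conditions replaced by membership propositions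
def ordC (so : List Char) (chars : List Char) (o : List Char) : List Char :=
  chars.foldl (fun o c => if c ∈ so ∧ c ∉ o then o ++ [c] else o) o

theorem ddfS_congr (l : List ℕ) : ∀ (s₁ s₂ : List ℕ), (∀ x, x ∈ s₁ ↔ x ∈ s₂) →
    ddfS s₁ l = ddfS s₂ l := by
  induction l with
  | nil => intro _ _ _; rfl
  | cons d r ih =>
    intro s₁ s₂ h
    simp only [ddfS]
    by_cases hd : d ∈ s₁
    · rw [if_pos hd, if_pos ((h d).mp hd), ih _ _ h]
    · rw [if_neg hd, if_neg (fun hh => hd ((h d).mpr hh)),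
        ih (d :: s₁) (d :: s₂) (by intro x; simp [h x])]

theorem cnt_iff (l : List ℕ) : ∀ (k : ℕ),
    (cnt l k = true ↔ ddfS (List.range k) l = List.range' k (ddfS (List.range k) l).length) := by
  induction l with
  | nil => intro k; simp [cnt, ddfS]
  | cons d r ih =>
    intro k
    simp only [cnt, ddfS, List.mem_range]
    rcases lt_trichotomy d k with hd | hd | hd
    · rw [if_pos hd, if_neg (by omega : ¬ k < d), if_neg (by omega : ¬ d = k)]
      exact ih k
    · subst hd
      rw [if_neg (by omega : ¬ (d : ℕ) < d), if_neg (lt_irrefl d), if_pos rfl]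
      rw [ddfS_congr r (d :: List.range d) (List.range (d + 1))
        (by intro x; simp [List.mem_range]; omega)]
      rw [List.length_cons, List.range'_succ]
      simp only [List.cons.injEq, true_and]
      exact ih (d + 1)
    · rw [if_pos hd, if_neg (by omega : ¬ d < k), List.length_cons, List.range'_succ]
      simp only [false_iff, Bool.false_eq_true]
      intro hh
      injection hh with h1 _
      omega

theorem vis_zero (n : ℕ) : vis n 0 = List.replicate n 0 := by
  apply List.ext_getElem
  · simp [vis]
  · intro i h1 h2; simp [vis]

theorem vis_set (n k j : ℕ) (hj : j < n) (hjk : j ≤ k) :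
    (vis n k).set j 1 = vis n (max k (j + 1)) := by
  apply List.ext_getElem
  · simp [vis]
  · intro i h1 h2
    simp only [vis, List.getElem_set, List.getElem_map, List.getElem_range]
    split_ifs <;> omega

theorem pyGet?_vis (n k : ℕ) (i : Int) (h0 : 0 ≤ i) (hn : i < n) :
    PySem.List.pyGet? (vis n k) i = some (if i.toNat < k then 1 else 0) := by
  rw [PySem.List.pyGet?_of_nonneg _ h0]
  have ht : i.toNat < n := by omega
  simp [vis, List.getElem?_map, ht]

theorem index?_eq_some_idxOf (c : Char) : ∀ (l : List Char), c ∈ l →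
    PySem.List.index? l c = some (l.idxOf c) := by
  intro l
  induction l with
  | nil => intro h; cases h
  | cons x r ih =>
    intro hm
    by_cases hx : x = c
    · subst hx
      rw [PySem.List.index?_cons_self, List.idxOf_cons_self]
    · have hmr : c ∈ r := by cases hm with | head => exact absurd rfl hx | tail _ h => exact h
      rw [PySem.List.index?_cons_of_ne _ hx, ih hmr, List.idxOf_cons]
      have : (x == c) = false := beq_eq_false_iff_ne.mpr hx
      simp [this]

theorem idxOf_inj (l : List Char) (a b : Char) (ha : a ∈ l) (hb : b ∈ l)
    (h : l.idxOf a = l.idxOf b) : a = b := by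
  have h1 := List.getElem_idxOf (x := a) (xs := l) (List.idxOf_lt_length_of_mem ha)
  have h2 := List.getElem_idxOf (x := b) (xs := l) (List.idxOf_lt_length_of_mem hb)
  rw [← h1, ← h2]
  congr 1

theorem aLoop_eq_cnt (h : Char) (tl : List Char) : ∀ (chars : List Char) (k : ℕ),
    k ≤ (h :: tl).length →
    solLoop (h :: tl) chars (vis (h :: tl).length k) = cnt (idxSeq (h :: tl) chars) k := by
  intro chars
  induction chars with
  | nil => intro k hk; simp [solLoop, idxSeq, cnt]
  | cons i rest ih =>
    intro k hk
    simp only [solLoop, PySem.List.pyGet?_zero_cons]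
    by_cases hih : i = h
    · subst hih
      rw [if_pos rfl]
      rw [vis_set _ _ 0 (by simp) (Nat.zero_le k)]
      have hmem : i ∈ i :: tl := List.mem_cons_self
      simp only [idxSeq, List.filterMap_cons, if_pos hmem, List.idxOf_cons_self]
      show solLoop _ rest _ = cnt (0 :: idxSeq (i :: tl) rest) k
      have hcnt : cnt (0 :: idxSeq (i :: tl) rest) k
          = cnt (idxSeq (i :: tl) rest) (max k 1) := by
        simp only [cnt, if_neg (by omega : ¬ k < 0)]
        congr 1
        split_ifs <;> omega
      rw [hcnt]
      exact ih (max k 1) (by simp at hk ⊢; omega)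
    · by_cases him : i ∈ h :: tl
      · rw [if_neg hih, if_pos him, index?_eq_some_idxOf i _ him]
        have hidx1 : 1 ≤ (h :: tl).idxOf i := by
          rw [List.idxOf_cons, show (h == i) = false from beq_eq_false_iff_ne.mpr (fun e => hih e.symm)]
          simp
        have hidxn : (h :: tl).idxOf i < (h :: tl).length := List.idxOf_lt_length_of_mem him
        set idx := (h :: tl).idxOf i with hidxdef
        show (if PySem.List.pyGet? (vis (h :: tl).length k) ((idx : Int) - 1) = some 1 then
            solLoop (h :: tl) rest ((vis (h :: tl).length k).set idx 1)
          else false) = cnt (idxSeq (h :: tl) (i :: rest)) k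
        rw [pyGet?_vis _ _ _ (by omega) (by push_cast; omega)]
        have htn : ((idx : Int) - 1).toNat = idx - 1 := by omega
        rw [htn]
        simp only [idxSeq, List.filterMap_cons, if_pos him, ← hidxdef]
        show _ = cnt (idx :: idxSeq (h :: tl) rest) k
        by_cases hc : idx - 1 < k
        · rw [if_pos (by simp [hc])]
          rw [vis_set _ _ idx hidxn (by omega)]
          have hcnt : cnt (idx :: idxSeq (h :: tl) rest) k
              = cnt (idxSeq (h :: tl) rest) (max k (idx + 1)) := by
            simp only [cnt, if_neg (by omega : ¬ k < idx)]
            congr 1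
            split_ifs <;> omega
          rw [hcnt]
          exact ih (max k (idx + 1)) (by simp at hk hidxn ⊢; omega)
        · rw [if_neg (by simp [hc])]
          have : cnt (idx :: idxSeq (h :: tl) rest) k = false := by
            simp only [cnt, if_pos (by omega : k < idx)]
          rw [this]
      · rw [if_neg hih, if_neg him]
        simp only [idxSeq, List.filterMap_cons, if_neg him]
        exact ih k hk

theorem buildFirst_general (l : List Char) : ∀ (s : Int) (d : PySem.Dict Char Int) (c : Char),
    ((PySem.List.enumerate l s).foldl
      (fun first p => if first.contains p.2 then first else first.insert p.2 p.1) d).get? c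
      = if d.contains c then d.get? c else (PySem.List.index? l c).map (fun k => s + (k : Int)) := by
  induction l with
  | nil =>
    intro s d c
    simp only [PySem.List.enumerate_nil, List.foldl_nil, PySem.List.index?_eq_idxOf?,
      List.idxOf?_nil, Option.map_none]
    split_ifs with hc
    · rfl
    · exact (PySem.Dict.get?_eq_none_iff_contains d c).mpr (by simpa using hc)
  | cons x r ih =>
    intro s d c
    rw [PySem.List.enumerate_cons, List.foldl_cons, ih (s + 1)]
    by_cases hd : d.contains x
    · simp only [if_pos hd]
      by_cases hcx : c = x
      · subst hcx
        rw [PySem.List.index?_cons_self]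
        simp [hd]
      · rw [PySem.List.index?_cons_of_ne _ (fun e => hcx e.symm)]
        split_ifs with h1
        · rfl
        · cases hidx : PySem.List.index? r c <;> simp <;> push_cast <;> ring
    · simp only [if_neg hd]
      by_cases hcx : c = x
      · subst hcx
        rw [PySem.List.index?_cons_self,
          if_pos (by rw [PySem.Dict.contains_insert]; simp),
          if_neg hd, PySem.Dict.get?_insert_self]
        simp
      · rw [PySem.List.index?_cons_of_ne _ (fun e => hcx e.symm),
          show ((d.insert x s).contains c) = d.contains c by
            rw [PySem.Dict.contains_insert]; simp [beq_eq_false_iff_ne.mpr hcx],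
          PySem.Dict.get?_insert_of_ne _ _ hcx]
        split_ifs with h1
        · rfl
        · cases hidx : PySem.List.index? r c <;> simp <;> push_cast <;> ring

theorem buildFirst_get? (so : List Char) (c : Char) :
    (buildFirst so).get? c = if c ∈ so then some ((so.idxOf c : ℕ) : Int) else none := by
  unfold buildFirst
  rw [buildFirst_general so 0 PySem.Dict.empty c]
  rw [if_neg (by simp [PySem.Dict.contains_empty])]
  by_cases hm : c ∈ so
  · rw [index?_eq_some_idxOf c so hm, if_pos hm]
    simp
  · rw [if_neg hm, (PySem.List.index?_eq_none_iff _ _).mpr hm]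
    rfl

theorem buildFirst_contains (so : List Char) (c : Char) :
    (buildFirst so).contains c = decide (c ∈ so) := by
  rw [PySem.Dict.contains_eq_isSome_get?, buildFirst_get?]
  by_cases hm : c ∈ so <;> simp [hm]

theorem altOrder_eq_ordC (so : List Char) (chars : List Char) :
    altOrder (buildFirst so) chars = ordC so chars [] := by
  unfold altOrder ordC
  congr 1
  funext o c
  rw [buildFirst_contains]
  by_cases h1 : c ∈ so <;> by_cases h2 : c ∈ o <;>
    simp [h1, h2]

theorem mem_ordC (so : List Char) : ∀ (chars o : List Char) (c : Char),
    c ∈ ordC so chars o → c ∈ o ∨ c ∈ so := by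
  intro chars
  induction chars with
  | nil => intro o c h; exact Or.inl h
  | cons x r ih =>
    intro o c h
    unfold ordC at h
    rw [List.foldl_cons] at h
    by_cases hx : x ∈ so ∧ x ∉ o
    · rw [if_pos hx] at h
      rcases ih (o ++ [x]) c h with hm | hm
      · rcases List.mem_append.mp hm with hm | hm
        · exact Or.inl hm
        · simp at hm; subst hm; exact Or.inr hx.1
      · exact Or.inr hm
    · rw [if_neg hx] at h
      exact ih o c h

theorem idxSeq_cons_mem (so : List Char) (x : Char) (r : List Char) (hx : x ∈ so) :
    idxSeq so (x :: r) = so.idxOf x :: idxSeq so r := by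
  simp [idxSeq, hx]

theorem idxSeq_cons_not_mem (so : List Char) (x : Char) (r : List Char) (hx : x ∉ so) :
    idxSeq so (x :: r) = idxSeq so r := by
  simp [idxSeq, hx]

theorem ordC_cons (so : List Char) (x : Char) (r o : List Char) :
    ordC so (x :: r) o = ordC so r (if x ∈ so ∧ x ∉ o then o ++ [x] else o) := rfl

theorem ddfS_cons (seen : List ℕ) (d : ℕ) (r : List ℕ) :
    ddfS seen (d :: r) = if d ∈ seen then ddfS seen r else d :: ddfS (d :: seen) r := rfl

theorem map_ordC (so : List Char) : ∀ (chars o : List Char), (∀ c ∈ o, c ∈ so) →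
    (ordC so chars o).map (fun c => so.idxOf c)
      = o.map (fun c => so.idxOf c) ++ ddfS (o.map (fun c => so.idxOf c)) (idxSeq so chars) := by
  intro chars
  induction chars with
  | nil => intro o ho; simp [ordC, idxSeq, ddfS]
  | cons x r ih =>
    intro o ho
    rw [ordC_cons]
    by_cases hx : x ∈ so
    · rw [idxSeq_cons_mem so x r hx]
      have hmemiff : (so.idxOf x ∈ o.map (fun c => so.idxOf c)) ↔ x ∈ o := by
        constructor
        · intro hm
          obtain ⟨c', hc', he⟩ := List.mem_map.mp hm
          exact (idxOf_inj so c' x (ho c' hc') hx he) ▸ hc'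
        · intro hm; exact List.mem_map.mpr ⟨x, hm, rfl⟩
      by_cases hxo : x ∈ o
      · rw [if_neg (by simp [hxo])]
        have hskip : ddfS (o.map fun c => so.idxOf c) (so.idxOf x :: idxSeq so r)
            = ddfS (o.map fun c => so.idxOf c) (idxSeq so r) := by
          rw [ddfS_cons, if_pos (hmemiff.mpr hxo)]
        rw [hskip]
        exact ih o ho
      · rw [if_pos ⟨hx, hxo⟩]
        have ho' : ∀ c ∈ o ++ [x], c ∈ so := by
          intro c hc
          rcases List.mem_append.mp hc with h | h
          · exact ho c h
          · simp at h; exact h ▸ hx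
        rw [ih (o ++ [x]) ho', List.map_append]
        have hkeep : ddfS (o.map fun c => so.idxOf c) (so.idxOf x :: idxSeq so r)
            = so.idxOf x :: ddfS (so.idxOf x :: o.map fun c => so.idxOf c) (idxSeq so r) := by
          rw [ddfS_cons, if_neg (by simp [hmemiff, hxo])]
        rw [hkeep,
          ddfS_congr (idxSeq so r) ((o.map fun c => so.idxOf c) ++ (List.map (fun c => so.idxOf c) [x]))
            (so.idxOf x :: o.map fun c => so.idxOf c) (by intro y; simp; exact Or.comm)]
        simp
    · rw [idxSeq_cons_not_mem so x r hx, if_neg (by simp [hx])]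
      exact ih o ho

theorem perTree (so : List Char) (t : List Char) (hpre : so ≠ [] ∨ t = []) :
    solLoop so t (List.replicate so.length 0)
      = decide ((altOrder (buildFirst so) t).map (fun c => (buildFirst so).getD c 0)
          = PySem.List.pyRange 0 ((altOrder (buildFirst so) t).length : Int) 1) := by
  cases so with
  | nil =>
    have ht : t = [] := by
      rcases hpre with h | h
      · exact absurd rfl h
      · exact h
    subst ht
    rfl
  | cons h tl =>
    rw [← vis_zero, aLoop_eq_cnt h tl t 0 (by simp)]
    rw [altOrder_eq_ordC]
    have hmapD : (ordC (h :: tl) t []).map (fun c => (buildFirst (h :: tl)).getD c 0)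
        = (ordC (h :: tl) t []).map (fun c => ((List.idxOf c (h :: tl) : ℕ) : Int)) := by
      apply List.map_congr_left
      intro c hc
      have hcm : c ∈ (h :: tl) := (mem_ordC _ t [] c hc).resolve_left (by simp)
      rw [PySem.Dict.getD_eq_get?_getD, buildFirst_get? _ c, if_pos hcm]
      rfl
    rw [hmapD]
    have hrange : PySem.List.pyRange 0 ((ordC (h :: tl) t []).length : Int) 1
        = (List.range (ordC (h :: tl) t []).length).map (fun k : ℕ => (k : Int)) := by
      rw [PySem.List.pyRange_one]
      simp
    rw [hrange]
    have hm := map_ordC (h :: tl) t [] (by intro c hc; cases hc)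
    simp only [List.map_nil, List.nil_append] at hm
    have hboole : cnt (idxSeq (h :: tl) t) 0 = decide (cnt (idxSeq (h :: tl) t) 0 = true) := by
      cases cnt (idxSeq (h :: tl) t) 0 <;> simp
    rw [hboole, decide_eq_decide]
    rw [cnt_iff (idxSeq (h :: tl) t) 0]
    rw [List.range_zero]
    have hinj : Function.Injective (fun k : ℕ => (k : Int)) := fun a b hab => by exact Int.natCast_inj.mp hab
    have hcomp : (fun c => ((List.idxOf c (h :: tl) : ℕ) : Int))
        = (fun k : ℕ => (k : Int)) ∘ (fun c => List.idxOf c (h :: tl)) := rfl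
    constructor
    · intro hdd
      have hlen : (ordC (h :: tl) t []).length = (ddfS [] (idxSeq (h :: tl) t)).length := by
        rw [← hm]
        simp
      have hnat : (ordC (h :: tl) t []).map (fun c => List.idxOf c (h :: tl))
          = List.range (ordC (h :: tl) t []).length := by
        rw [hm, hdd, List.range_eq_range', hlen]
      rw [hcomp, ← List.map_map, hnat]
    · intro hh
      have hnat : (ordC (h :: tl) t []).map (fun c => List.idxOf c (h :: tl))
          = List.range (ordC (h :: tl) t []).length := by
        apply List.map_injective_iff.mpr hinj
        rw [List.map_map]
        exact hh
      have hL : ddfS [] (idxSeq (h :: tl) t) = List.range' 0 (ordC (h :: tl) t []).length := by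
        rw [← hm, hnat, List.range_eq_range']
      rw [hL]
      simp

-- ===== VERDICT (by name: the statement is the Claim_ definition above) =====
theorem solution_spec : Claim_equal_solution := by
  intro skill trees hdom hpre
  show solution skill trees = solution_alt skill trees
  unfold solution solution_alt
  have hpre' : ∀ t ∈ trees, skill.toList ≠ [] ∨ t.toList = [] := by
    intro t ht
    rcases hpre with h | h
    · exact Or.inl h
    · exact Or.inr (h t ht)
  revert hpre'
  generalize skill.toList = so
  intro hpre'
  show trees.foldl _ 0 = trees.foldl _ 0
  suffices hgen : ∀ (ts : List String), (∀ t ∈ ts, so ≠ [] ∨ t.toList = []) → ∀ acc : Int,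
      ts.foldl (fun answer s =>
        if solLoop so s.toList (List.replicate so.length 0) then answer + 1 else answer) acc
      = ts.foldl (fun answer tree =>
        if (altOrder (buildFirst so) tree.toList).map (fun c => (buildFirst so).getD c 0)
            = PySem.List.pyRange 0 ((altOrder (buildFirst so) tree.toList).length : Int) 1
        then answer + 1 else answer) acc by
    exact hgen trees hpre' 0
  intro ts
  induction ts with
  | nil => intro _ _; rfl
  | cons t rest ih =>
    intro hts acc
    rw [List.foldl_cons, List.foldl_cons, perTree so t.toList (hts t List.mem_cons_self)]
    have hrest : ∀ u ∈ rest, so ≠ [] ∨ u.toList = [] :=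
      fun u hu => hts u (List.mem_cons_of_mem t hu)
    by_cases hP : (altOrder (buildFirst so) t.toList).map (fun c => (buildFirst so).getD c 0)
        = PySem.List.pyRange 0 ((altOrder (buildFirst so) t.toList).length : Int) 1
    · rw [decide_eq_true hP, if_pos rfl, if_pos hP]
      exact ih hrest (acc + 1)
    · rw [decide_eq_false hP, if_neg hP, if_neg (by simp : ¬ false = true)]
      exact ih hrest acc
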